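-- pv_equiv track=rewrite | github.com/Nicolaslahri/downloadarr | backend/app/api/settings.py | _merge_secret_lists
-- ===== SOURCE A (Python) =====
-- def _merge_secret_lists(
--     existing: list[dict],
--     incoming: list[dict],
--     secret_keys: tuple[str, ...],
-- ) -> list[dict]:
--     by_name = {(e.get("name") or "").lower(): e for e in existing}
--     out: list[dict] = []
--     for item in incoming:
--         merged = dict(item)
--         prior = by_name.get((item.get("name") or "").lower())
--         if prior:
--             for k in secret_keys:
--                 if not merged.get(k) and prior.get(k):
--                     merged[k] = prior[k]
--         for k in list(merged.keys()):
--             if k.endswith("_set"):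
--                 merged.pop(k, None)
--         out.append(merged)
--     return out
-- ===== SOURCE B (Python) =====
-- def _merge_secret_lists(
--     existing: list[dict],
--     incoming: list[dict],
--     secret_keys: tuple[str, ...],
-- ) -> list[dict]:
--     # Key-major staged passes: for each secret key, build a name -> value column
--     # map from existing and fill that one key across all staged items.
--     staged = [(dict(item), (item.get("name") or "").lower()) for item in incoming]
--     for k in secret_keys:
--         vals = {(e.get("name") or "").lower(): e.get(k) for e in existing}
--         for m, name in staged:
--             if not m.get(k) and vals.get(name):
--                 m[k] = vals[name]
--     return [{k: v for k, v in m.items() if not k.endswith("_set")} for m, _ in staged]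
-- ===== Notes on version B (the rewrite author's own statement) =====
-- stated objective: alternative
-- what changed: Loop interchange: instead of A's row-major pass (one name->entry index, then per incoming item fill all secret keys and pop '_set' keys), B works key-major in staged passes - for each secret key it builds a name->value column map from existing and fills that single key across all staged incoming items, then a final pass strips '_set' keys; correct because each key's fill is independent of the others.
import Mathlib
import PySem

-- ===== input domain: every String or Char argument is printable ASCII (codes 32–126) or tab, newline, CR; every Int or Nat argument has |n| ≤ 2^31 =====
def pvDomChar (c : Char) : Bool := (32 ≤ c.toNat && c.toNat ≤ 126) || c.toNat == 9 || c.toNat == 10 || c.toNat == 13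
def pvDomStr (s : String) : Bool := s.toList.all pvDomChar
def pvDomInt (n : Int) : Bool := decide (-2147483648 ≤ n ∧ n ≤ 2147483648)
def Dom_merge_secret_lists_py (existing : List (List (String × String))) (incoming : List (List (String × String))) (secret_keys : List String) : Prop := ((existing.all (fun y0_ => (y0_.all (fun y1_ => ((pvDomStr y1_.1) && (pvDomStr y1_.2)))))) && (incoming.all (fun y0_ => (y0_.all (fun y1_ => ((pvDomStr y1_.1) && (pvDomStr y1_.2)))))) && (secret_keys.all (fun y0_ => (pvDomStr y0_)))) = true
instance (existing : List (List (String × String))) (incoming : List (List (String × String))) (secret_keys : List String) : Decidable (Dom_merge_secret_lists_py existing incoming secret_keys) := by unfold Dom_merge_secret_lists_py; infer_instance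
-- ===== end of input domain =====

-- B interchanges the loops: key-major staged passes (per secret key, a name->value column map
-- from existing is filled across all staged incoming items) instead of A's row-major merge
-- against a name->entry index (alternative algorithm, same cost class).

-- ===== PORT A =====
-- the lowercased '(d.get("name") or "")' used as the merge key (text shared by both sources)
def pvKeyOf (d : PySem.Dict String String) : String :=
  PySem.Str.lower ((d.get? "name").getD "")

-- A's 'for k in secret_keys: if not merged.get(k) and prior.get(k): merged[k] = prior[k]' loop
def pvFill (prior : PySem.Dict String String) (secret_keys : List String)
    (merged : PySem.Dict String String) : PySem.Dict String String :=
  secret_keys.foldl (fun m k =>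
    if m.getD k "" = "" ∧ prior.getD k "" ≠ "" then m.insert k (prior.getD k "") else m) merged

def merge_secret_lists_py (existing : List (List (String × String))) (incoming : List (List (String × String))) (secret_keys : List String) : List (List (String × String)) :=
  let by_name : PySem.Dict String (PySem.Dict String String) :=
    existing.foldl (fun d e =>
      let ed := PySem.Dict.ofList e
      d.insert (pvKeyOf ed) ed) PySem.Dict.empty
  incoming.foldl (fun out item =>
    let merged0 := PySem.Dict.ofList item
    let merged1 :=
      match by_name.get? (pvKeyOf merged0) with
      | some prior => if prior.size ≠ 0 then pvFill prior secret_keys merged0 else merged0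
      | none => merged0
    let merged2 := merged1.keys.foldl (fun m k =>
      if PySem.Str.endswith k "_set" then m.erase k else m) merged1
    out ++ [merged2.items]) []

-- ===== PORT B =====
-- the per-key column map: name -> e.get(k) of the existing entries
def pvVals (existing : List (List (String × String))) (k : String) : PySem.Dict String String :=
  existing.foldl (fun d e =>
    d.insert (pvKeyOf (PySem.Dict.ofList e)) ((PySem.Dict.ofList e).getD k "")) PySem.Dict.empty

-- one staged item updated for key k: fill iff its own value is falsy and the column value truthy
def pvColStep (vals : PySem.Dict String String) (k : String)
    (p : PySem.Dict String String × String) : PySem.Dict String String × String :=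
  if p.1.getD k "" = "" ∧ vals.getD p.2 "" ≠ "" then (p.1.insert k (vals.getD p.2 ""), p.2) else p

def merge_secret_lists_py_alt (existing : List (List (String × String))) (incoming : List (List (String × String))) (secret_keys : List String) : List (List (String × String)) :=
  let staged0 := incoming.map (fun item =>
    (PySem.Dict.ofList item, pvKeyOf (PySem.Dict.ofList item)))
  let staged := secret_keys.foldl (fun st k =>
    let vals := pvVals existing k
    st.map (pvColStep vals k)) staged0
  staged.map (fun p => p.1.items.filter (fun pr => !(PySem.Str.endswith pr.1 "_set")))

-- ===== PRECONDITION & SPEC =====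
def Spec_merge_secret_lists_py (existing : List (List (String × String))) (incoming : List (List (String × String))) (secret_keys : List String) (out : List (List (String × String))) : Prop := out = merge_secret_lists_py_alt existing incoming secret_keys
instance (existing : List (List (String × String))) (incoming : List (List (String × String))) (secret_keys : List String) (out : List (List (String × String))) : Decidable (Spec_merge_secret_lists_py existing incoming secret_keys out) := by unfold Spec_merge_secret_lists_py; infer_instance

-- ===== CLAIM (what is proved, stated in full; the proofs are below) =====
def Claim_equal_merge_secret_lists_py : Prop := ∀ (existing : List (List (String × String))) (incoming : List (List (String × String))) (secret_keys : List String), Dom_merge_secret_lists_py existing incoming secret_keys → Spec_merge_secret_lists_py existing incoming secret_keys (merge_secret_lists_py existing incoming secret_keys)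

-- ===== LEMMAS AND PROOFS =====

-- a get? on a fold of inserts is the value of the LAST inserted matching key
theorem pv_get?_foldl_insert {α β : Type} (key : α → String) (val : α → β)
    (l : List α) (d : PySem.Dict String β) (x : String) :
    (l.foldl (fun d e => d.insert (key e) (val e)) d).get? x
      = match l.reverse.find? (fun e => key e == x) with
        | some e => some (val e)
        | none => d.get? x := by
  induction l generalizing d with
  | nil => simp
  | cons a t ih =>
    rw [List.foldl_cons, ih, List.reverse_cons, List.find?_append]
    cases h : t.reverse.find? (fun e => key e == x) with
    | some e => rfl
    | none =>
      simp only [Option.none_or, List.find?_cons, List.find?_nil]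
      by_cases hx : key a == x
      · have hxa : x = key a := (eq_of_beq hx).symm
        subst hxa
        simp only [beq_self_eq_true, PySem.Dict.get?_insert_self]
      · have hne : x ≠ key a := fun hxy => hx (by simp [hxy])
        simp only [hx, PySem.Dict.get?_insert_of_ne _ _ hne]

-- the erase loop over a key snapshot equals one filter
theorem pv_erase_fold_eq_filter (p : String → Bool) (ks : List String)
    (d : PySem.Dict String String) :
    (ks.foldl (fun m k => if p k then m.erase k else m) d).items
      = d.items.filter (fun pr => !(p pr.1 && ks.contains pr.1)) := by
  induction ks generalizing d with
  | nil => simp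
  | cons k t ih =>
    simp only [List.foldl_cons, ih]
    by_cases hp : p k
    · simp only [hp, if_true, PySem.Dict.erase, List.filter_filter]
      apply List.filter_congr
      intro pr _
      by_cases hpk : pr.1 = k <;> simp [hpk, hp]
    · simp only [hp, Bool.false_eq_true, if_false]
      apply List.filter_congr
      intro pr _
      by_cases hpk : pr.1 = k <;> simp [hpk, hp]

-- the erase loop over ALL keys of d is a filter of d.items by the key test alone
theorem pv_erase_keys_eq_filter (p : String → Bool) (d : PySem.Dict String String) :
    (d.keys.foldl (fun m k => if p k then m.erase k else m) d).items
      = d.items.filter (fun pr => !(p pr.1)) := by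
  rw [pv_erase_fold_eq_filter]
  apply List.filter_congr
  intro pr hpr
  have : pr.1 ∈ d.keys := by
    simp only [PySem.Dict.keys, List.mem_map]
    exact ⟨pr, hpr, rfl⟩
  simp [this]

-- loop interchange: a fold of maps over a list is a map of per-element folds
theorem pv_foldl_map_comm {σ κ : Type} (f : κ → σ → σ) (ks : List κ) (xs : List σ) :
    ks.foldl (fun l k => l.map (f k)) xs = xs.map (fun x => ks.foldl (fun s k => f k s) x) := by
  induction ks generalizing xs with
  | nil => simp
  | cons a t ih => simp [List.foldl_cons, ih, List.map_map, Function.comp_def]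

-- an empty dict looks up to the default
theorem pv_getD_of_size_zero (d : PySem.Dict String String) (h : d.size = 0) (k : String) :
    d.getD k "" = "" := by
  have : d.items = [] := List.eq_nil_of_length_eq_zero h
  simp [PySem.Dict.getD, PySem.Dict.get?, this]

-- the column lookup is the last existing entry's value for that key
theorem pv_vals_get (existing : List (List (String × String))) (k name : String) :
    (pvVals existing k).getD name ""
      = match existing.reverse.find? (fun e => pvKeyOf (PySem.Dict.ofList e) == name) with
        | some e => (PySem.Dict.ofList e).getD k ""
        | none => "" := by
  unfold pvVals
  rw [PySem.Dict.getD_eq_get?_getD,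
      pv_get?_foldl_insert (fun e => pvKeyOf (PySem.Dict.ofList e))
        (fun e => (PySem.Dict.ofList e).getD k "")]
  cases existing.reverse.find? (fun e => pvKeyOf (PySem.Dict.ofList e) == name) <;> simp

-- the per-item key-fold is the identity when every column lookup for this name is falsy
theorem pv_col_fold_id (existing : List (List (String × String))) (ks : List String)
    (m : PySem.Dict String String) (name : String)
    (hv : ∀ k, (pvVals existing k).getD name "" = "") :
    ks.foldl (fun p k => pvColStep (pvVals existing k) k p) (m, name) = (m, name) := by
  induction ks generalizing m with
  | nil => rfl
  | cons k t ih =>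
    have hstep : pvColStep (pvVals existing k) k (m, name) = (m, name) := by
      simp [pvColStep, hv k]
    rw [List.foldl_cons, hstep]
    exact ih m

-- the per-item key-fold is pvFill against prior when every column lookup is prior's value
theorem pv_col_fold_fill (existing : List (List (String × String))) (ks : List String)
    (m prior : PySem.Dict String String) (name : String)
    (hv : ∀ k, (pvVals existing k).getD name "" = prior.getD k "") :
    ks.foldl (fun p k => pvColStep (pvVals existing k) k p) (m, name)
      = (pvFill prior ks m, name) := by
  induction ks generalizing m with
  | nil => rfl
  | cons k t ih =>
    rw [List.foldl_cons]
    unfold pvFill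
    rw [List.foldl_cons]
    have hstep : pvColStep (pvVals existing k) k (m, name)
        = (if m.getD k "" = "" ∧ prior.getD k "" ≠ "" then m.insert k (prior.getD k "") else m,
           name) := by
      simp only [pvColStep, hv k]
      by_cases hc : m.getD k "" = "" ∧ prior.getD k "" ≠ "" <;> simp [hc]
    rw [hstep]
    by_cases hc : m.getD k "" = "" ∧ prior.getD k "" ≠ ""
    · rw [if_pos hc]; exact ih _
    · rw [if_neg hc]; exact ih _

-- the per-item key-fold of B equals A's guarded pvFill against the last matching prior
theorem pv_col_fold_eq_fill (existing : List (List (String × String))) (ks : List String)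
    (m : PySem.Dict String String) (name : String) :
    ks.foldl (fun p k => pvColStep (pvVals existing k) k p) (m, name)
      = (match existing.reverse.find? (fun e => pvKeyOf (PySem.Dict.ofList e) == name) with
         | some e => if (PySem.Dict.ofList e).size ≠ 0 then pvFill (PySem.Dict.ofList e) ks m else m
         | none => m, name) := by
  cases h : existing.reverse.find? (fun e => pvKeyOf (PySem.Dict.ofList e) == name) with
  | none =>
    simp only
    exact pv_col_fold_id existing ks m name (fun k => by rw [pv_vals_get, h])
  | some e =>
    show ks.foldl (fun p k => pvColStep (pvVals existing k) k p) (m, name)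
        = (if (PySem.Dict.ofList e).size ≠ 0 then pvFill (PySem.Dict.ofList e) ks m else m, name)
    by_cases hs : (PySem.Dict.ofList e).size ≠ 0
    · rw [if_pos hs]
      exact pv_col_fold_fill existing ks m (PySem.Dict.ofList e) name
        (fun k => by rw [pv_vals_get, h])
    · have hz : (PySem.Dict.ofList e).size = 0 := by omega
      rw [if_neg hs]
      exact pv_col_fold_id existing ks m name
        (fun k => by rw [pv_vals_get, h]; exact pv_getD_of_size_zero _ hz k)

-- ===== VERDICT (by name: the statement is the Claim_ definition above) =====
theorem merge_secret_lists_py_spec : Claim_equal_merge_secret_lists_py := by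
  intro existing incoming secret_keys _
  unfold Spec_merge_secret_lists_py merge_secret_lists_py merge_secret_lists_py_alt
  rw [PySem.List.foldl_append_singleton_eq_map]
  simp only [List.nil_append]
  rw [pv_foldl_map_comm (fun k p => pvColStep (pvVals existing k) k p), List.map_map,
      List.map_map]
  apply List.map_congr_left
  intro item _
  simp only [Function.comp_def]
  rw [pv_col_fold_eq_fill]
  rw [pv_get?_foldl_insert (fun e => pvKeyOf (PySem.Dict.ofList e)) (fun e => PySem.Dict.ofList e)]
  simp only [PySem.Dict.get?_empty]
  cases h : existing.reverse.find?
      (fun e => pvKeyOf (PySem.Dict.ofList e) == pvKeyOf (PySem.Dict.ofList item)) with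
  | some e =>
    simp only
    by_cases hs : (PySem.Dict.ofList e).size ≠ 0
    · exact pv_erase_keys_eq_filter _ _
    · exact pv_erase_keys_eq_filter _ _
  | none => exact pv_erase_keys_eq_filter _ _
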